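-- pv_equiv track=rewrite | github.com/Yashwanth137/LeetCode-Solutions | Solutions/2600 - 2699/2684. Maximum Number of Moves in a Grid/Solution.py | maxMoves
-- ===== SOURCE A (Python) =====
-- from typing import List
--
-- def maxMoves(grid: List[List[int]]) -> int:
--     m, n = len(grid), len(grid[0])
--     dp = [[-1] * n for _ in range(m)]
--     max_moves = 0
--
--     def dfs(row, col):
--         if col == n - 1:
--             return 0
--         if dp[row][col] != -1:
--             return dp[row][col]
--
--         moves = 0
--         for drow in [-1, 0, 1]:
--             new_row, new_col = row + drow, col + 1
--             if 0 <= new_row < m and 0 <= new_col < n and grid[new_row][new_col] > grid[row][col]: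
--                 moves = max(moves, 1 + dfs(new_row, new_col))
--
--         dp[row][col] = moves
--         return dp[row][col]
--
--     for i in range(m):
--         max_moves = max(max_moves, dfs(i, 0))
--
--     return max_moves
-- ===== SOURCE B (Python) =====
-- def best_move(grid, m, col, nxt, row):
--     best = 0
--     for drow in (-1, 0, 1):
--         r = row + drow
--         if 0 <= r < m and grid[r][col + 1] > grid[row][col]:
--             best = max(best, 1 + nxt[r])
--     return best
--
--
-- def maxMoves(grid):
--     m, n = len(grid), len(grid[0])
--     nxt = [0] * m
--     for col in reversed(range(n - 1)):
--         nxt = [best_move(grid, m, col, nxt, row) for row in range(m)]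
--     return max(nxt)
-- ===== Notes on version B (the rewrite author's own statement) =====
-- stated objective: simpler
-- what changed: Replaces the recursive top-down memoized DFS (mutable memo table with -1 sentinel, nested function) by an iterative bottom-up DP that sweeps columns right-to-left keeping only the next column's values.
-- outside the precondition, e.g. on maxMoves([[1, 1, 1], [1, 1]]): A returns 0, B raises IndexError
import Mathlib
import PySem

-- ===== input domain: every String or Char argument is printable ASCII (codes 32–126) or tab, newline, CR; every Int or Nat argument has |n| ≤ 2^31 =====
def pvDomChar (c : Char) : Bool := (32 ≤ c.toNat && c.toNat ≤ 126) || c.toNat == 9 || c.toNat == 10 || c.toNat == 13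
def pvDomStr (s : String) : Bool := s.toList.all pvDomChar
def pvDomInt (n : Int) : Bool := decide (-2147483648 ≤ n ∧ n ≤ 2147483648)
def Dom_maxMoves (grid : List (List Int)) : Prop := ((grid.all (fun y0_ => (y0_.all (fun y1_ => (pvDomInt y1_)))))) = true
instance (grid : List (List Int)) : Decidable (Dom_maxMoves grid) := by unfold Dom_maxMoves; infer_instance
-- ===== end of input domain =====

-- B replaces A's recursive memoized DFS by an iterative bottom-up DP that sweeps
-- columns right-to-left keeping only the next column's values (objective: simpler).

-- shared trivial indexing helper: grid[r][c] (always in bounds on admitted inputs)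
def pvGval (grid : List (List Int)) (r c : Nat) : Int := (grid.getD r []).getD c 0

-- ===== PORT A =====
def dfsA (grid : List (List Int)) (m n : Nat) :
    Nat → Nat → Nat → List (List Int) → List (List Int) × Int
  -- fuel-guarded structural recursion; the fuel (n at the top call) is never
  -- exhausted on admitted inputs, it only makes the recursion structural
  | 0, _, _, dp => (dp, 0)
  | fuel + 1, row, col, dp =>
    if col = n - 1 then (dp, 0)
    else if (dp.getD row []).getD col (-1) ≠ -1 then (dp, (dp.getD row []).getD col (-1))
    else
      let st1 : List (List Int) × Int :=
        if _h1 : 0 < row ∧ row - 1 < m ∧ col + 1 < n ∧ pvGval grid row col < pvGval grid (row - 1) (col + 1) then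
          let r := dfsA grid m n fuel (row - 1) (col + 1) dp
          (r.1, max 0 (1 + r.2))
        else (dp, 0)
      let st2 : List (List Int) × Int :=
        if _h2 : row < m ∧ col + 1 < n ∧ pvGval grid row col < pvGval grid row (col + 1) then
          let r := dfsA grid m n fuel row (col + 1) st1.1
          (r.1, max st1.2 (1 + r.2))
        else st1
      let st3 : List (List Int) × Int :=
        if _h3 : row + 1 < m ∧ col + 1 < n ∧ pvGval grid row col < pvGval grid (row + 1) (col + 1) then
          let r := dfsA grid m n fuel (row + 1) (col + 1) st2.1
          (r.1, max st2.2 (1 + r.2))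
        else st2
      (st3.1.set row ((st3.1.getD row []).set col st3.2), st3.2)

def maxMoves (grid : List (List Int)) : Int :=
  let m := grid.length
  let n := (grid.headD []).length
  let dp0 := List.replicate m (List.replicate n (-1 : Int))
  ((List.range m).foldl (fun (st : List (List Int) × Int) i =>
      let r := dfsA grid m n n i 0 st.1
      (r.1, max st.2 r.2)) (dp0, 0)).2

-- ===== PORT B =====
def bestMove (grid : List (List Int)) (m : Nat) (col : Nat) (nxt : List Int) (row : Nat) : Int :=
  [(-1 : Int), 0, 1].foldl (fun best drow =>
    let r : Int := (row : Int) + drow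
    if 0 ≤ r ∧ r < (m : Int) ∧ pvGval grid row col < pvGval grid r.toNat (col + 1) then
      max best (1 + nxt.getD r.toNat 0)
    else best) 0

def maxMoves_alt (grid : List (List Int)) : Int :=
  let m := grid.length
  let n := (grid.headD []).length
  let final := ((List.range (n - 1)).reverse).foldl
      (fun nxt col => (List.range m).map (fun row => bestMove grid m col nxt row))
      (List.replicate m (0 : Int))
  match PySem.List.max? final (fun x => x) with
  | some v => v
  | none => 0

-- ===== PRECONDITION & SPEC =====
-- Pre_ excludes inputs on which Python A raises IndexError: the empty grid, an empty
-- first row, and multi-column ragged grids with a row shorter than the first (on a few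
-- such ragged grids the short spot happens never to be probed and A still returns;
-- these are excluded too, and B raises there).
def Pre_maxMoves (grid : List (List Int)) : Prop :=
  grid ≠ [] ∧ grid.headD [] ≠ [] ∧
    ((grid.headD []).length = 1 ∨ ∀ r ∈ grid, (grid.headD []).length ≤ r.length)
instance (grid : List (List Int)) : Decidable (Pre_maxMoves grid) := by
  unfold Pre_maxMoves; infer_instance
def pvWitness_maxMoves : List (List Int) := [[1, 2], [3, 4]]
def Spec_maxMoves (grid : List (List Int)) (out : Int) : Prop := out = maxMoves_alt grid
instance (grid : List (List Int)) (out : Int) : Decidable (Spec_maxMoves grid out) := by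
  unfold Spec_maxMoves; infer_instance

-- ===== CLAIM (what is proved, stated in full; the proofs are below) =====
def Claim_equal_maxMoves : Prop :=
  ∀ (grid : List (List Int)), Dom_maxMoves grid → Pre_maxMoves grid →
    Spec_maxMoves grid (maxMoves grid)

-- ===== LEMMAS AND PROOFS =====

-- the pure (memo-free) value of A's dfs; both ports are proved to compute it
def pureP (grid : List (List Int)) (m n : Nat) (row col : Nat) : Int :=
  if col = n - 1 then 0
  else
    let m1 : Int :=
      if h1 : 0 < row ∧ row - 1 < m ∧ col + 1 < n ∧ pvGval grid row col < pvGval grid (row - 1) (col + 1) then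
        max 0 (1 + pureP grid m n (row - 1) (col + 1))
      else 0
    let m2 : Int :=
      if h2 : row < m ∧ col + 1 < n ∧ pvGval grid row col < pvGval grid row (col + 1) then
        max m1 (1 + pureP grid m n row (col + 1))
      else m1
    let m3 : Int :=
      if h3 : row + 1 < m ∧ col + 1 < n ∧ pvGval grid row col < pvGval grid (row + 1) (col + 1) then
        max m2 (1 + pureP grid m n (row + 1) (col + 1))
      else m2
    m3
termination_by n - col
decreasing_by all_goals omega

lemma pureP_nonneg (grid : List (List Int)) (m n row col : Nat) :
    0 ≤ pureP grid m n row col := by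
  rw [pureP]
  split_ifs <;> simp

-- memo-table validity: every non-(-1) entry stores the pure value
def goodDp (grid : List (List Int)) (m n : Nat) (dp : List (List Int)) : Prop :=
  ∀ r c : Nat, (dp.getD r []).getD c (-1) ≠ -1 →
    (dp.getD r []).getD c (-1) = pureP grid m n r c

lemma pv_getD_set {α : Type} (l : List α) (i j : Nat) (a d : α) :
    (l.set i a).getD j d = if j = i ∧ i < l.length then a else l.getD j d := by
  by_cases hij : j = i
  · subst hij
    by_cases hl : j < l.length
    · simp [List.getD_eq_getElem?_getD, hl]
    · simp [List.getD_eq_getElem?_getD, hl]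
  · rw [if_neg (fun h => hij h.1)]
    simp only [List.getD_eq_getElem?_getD, List.getElem?_set]
    rw [if_neg (fun h => hij h.symm)]

lemma goodDp_write (grid : List (List Int)) (m n : Nat) (dp : List (List Int))
    (row col : Nat) (v : Int) (hdp : goodDp grid m n dp)
    (hv : v = pureP grid m n row col) :
    goodDp grid m n (dp.set row ((dp.getD row []).set col v)) := by
  intro r c hne
  rw [pv_getD_set] at hne ⊢
  split_ifs at hne ⊢ with h
  · obtain ⟨hr, _⟩ := h
    subst hr
    rw [pv_getD_set] at hne ⊢
    split_ifs at hne ⊢ with h2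
    · obtain ⟨hc, _⟩ := h2
      subst hc; exact hv
    · exact hdp r c hne
  · exact hdp r c hne

lemma dfs_correct (grid : List (List Int)) (m n : Nat) :
    ∀ (fuel col row : Nat) (dp : List (List Int)), n - col ≤ fuel → goodDp grid m n dp →
      (dfsA grid m n fuel row col dp).2 = pureP grid m n row col ∧
      goodDp grid m n (dfsA grid m n fuel row col dp).1 := by
  intro fuel
  induction fuel with
  | zero =>
    intro col row dp hk hdp
    rw [dfsA]
    refine ⟨?_, hdp⟩
    by_cases hb : col = n - 1
    · rw [pureP, if_pos hb]
    · have c1 : ¬ (0 < row ∧ row - 1 < m ∧ col + 1 < n ∧ pvGval grid row col < pvGval grid (row - 1) (col + 1)) := by omega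
      have c2 : ¬ (row < m ∧ col + 1 < n ∧ pvGval grid row col < pvGval grid row (col + 1)) := by omega
      have c3 : ¬ (row + 1 < m ∧ col + 1 < n ∧ pvGval grid row col < pvGval grid (row + 1) (col + 1)) := by omega
      rw [pureP, if_neg hb]
      simp only [dif_neg c1, dif_neg c2, dif_neg c3]
  | succ fuel ih =>
    intro col row dp hk hdp
    rw [dfsA]
    by_cases hb : col = n - 1
    · rw [if_pos hb]
      exact ⟨by rw [pureP, if_pos hb], hdp⟩
    · rw [if_neg hb]
      by_cases hmemo : (dp.getD row []).getD col (-1) ≠ -1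
      · rw [if_pos hmemo]
        exact ⟨hdp row col hmemo, hdp⟩
      · rw [if_neg hmemo]
        have hk' : n - (col + 1) ≤ fuel := by omega
        by_cases h1 : 0 < row ∧ row - 1 < m ∧ col + 1 < n ∧ pvGval grid row col < pvGval grid (row - 1) (col + 1) <;>
          by_cases h2 : row < m ∧ col + 1 < n ∧ pvGval grid row col < pvGval grid row (col + 1) <;>
            by_cases h3 : row + 1 < m ∧ col + 1 < n ∧ pvGval grid row col < pvGval grid (row + 1) (col + 1)
        ·
          obtain ⟨e1, g1⟩ := ih (col + 1) (row - 1) dp hk' hdp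
          obtain ⟨e2, g2⟩ := ih (col + 1) row _ hk' g1
          obtain ⟨e3, g3⟩ := ih (col + 1) (row + 1) _ hk' g2
          simp only [dif_pos h1, dif_pos h2, dif_pos h3]
          exact ⟨by rw [pureP, if_neg hb]; simp only [dif_pos h1, dif_pos h2, dif_pos h3]; rw [e1, e2, e3],
            goodDp_write grid m n _ row col _ g3
              (by rw [pureP, if_neg hb]; simp only [dif_pos h1, dif_pos h2, dif_pos h3]; rw [e1, e2, e3])⟩
        ·
          obtain ⟨e1, g1⟩ := ih (col + 1) (row - 1) dp hk' hdp
          obtain ⟨e2, g2⟩ := ih (col + 1) row _ hk' g1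
          simp only [dif_pos h1, dif_pos h2, dif_neg h3]
          exact ⟨by rw [pureP, if_neg hb]; simp only [dif_pos h1, dif_pos h2, dif_neg h3]; rw [e1, e2],
            goodDp_write grid m n _ row col _ g2
              (by rw [pureP, if_neg hb]; simp only [dif_pos h1, dif_pos h2, dif_neg h3]; rw [e1, e2])⟩
        ·
          obtain ⟨e1, g1⟩ := ih (col + 1) (row - 1) dp hk' hdp
          obtain ⟨e3, g3⟩ := ih (col + 1) (row + 1) _ hk' g1
          simp only [dif_pos h1, dif_neg h2, dif_pos h3]
          exact ⟨by rw [pureP, if_neg hb]; simp only [dif_pos h1, dif_neg h2, dif_pos h3]; rw [e1, e3],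
            goodDp_write grid m n _ row col _ g3
              (by rw [pureP, if_neg hb]; simp only [dif_pos h1, dif_neg h2, dif_pos h3]; rw [e1, e3])⟩
        ·
          obtain ⟨e1, g1⟩ := ih (col + 1) (row - 1) dp hk' hdp
          simp only [dif_pos h1, dif_neg h2, dif_neg h3]
          exact ⟨by rw [pureP, if_neg hb]; simp only [dif_pos h1, dif_neg h2, dif_neg h3]; rw [e1],
            goodDp_write grid m n _ row col _ g1
              (by rw [pureP, if_neg hb]; simp only [dif_pos h1, dif_neg h2, dif_neg h3]; rw [e1])⟩
        ·
          obtain ⟨e2, g2⟩ := ih (col + 1) row dp hk' hdp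
          obtain ⟨e3, g3⟩ := ih (col + 1) (row + 1) _ hk' g2
          simp only [dif_neg h1, dif_pos h2, dif_pos h3]
          exact ⟨by rw [pureP, if_neg hb]; simp only [dif_neg h1, dif_pos h2, dif_pos h3]; rw [e2, e3],
            goodDp_write grid m n _ row col _ g3
              (by rw [pureP, if_neg hb]; simp only [dif_neg h1, dif_pos h2, dif_pos h3]; rw [e2, e3])⟩
        ·
          obtain ⟨e2, g2⟩ := ih (col + 1) row dp hk' hdp
          simp only [dif_neg h1, dif_pos h2, dif_neg h3]
          exact ⟨by rw [pureP, if_neg hb]; simp only [dif_neg h1, dif_pos h2, dif_neg h3]; rw [e2],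
            goodDp_write grid m n _ row col _ g2
              (by rw [pureP, if_neg hb]; simp only [dif_neg h1, dif_pos h2, dif_neg h3]; rw [e2])⟩
        ·
          obtain ⟨e3, g3⟩ := ih (col + 1) (row + 1) dp hk' hdp
          simp only [dif_neg h1, dif_neg h2, dif_pos h3]
          exact ⟨by rw [pureP, if_neg hb]; simp only [dif_neg h1, dif_neg h2, dif_pos h3]; rw [e3],
            goodDp_write grid m n _ row col _ g3
              (by rw [pureP, if_neg hb]; simp only [dif_neg h1, dif_neg h2, dif_pos h3]; rw [e3])⟩
        ·
          simp only [dif_neg h1, dif_neg h2, dif_neg h3]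
          exact ⟨by rw [pureP, if_neg hb]; simp only [dif_neg h1, dif_neg h2, dif_neg h3],
            goodDp_write grid m n dp row col 0 hdp
              (by rw [pureP, if_neg hb]; simp only [dif_neg h1, dif_neg h2, dif_neg h3])⟩

-- the column vector of pure values
def colVec (grid : List (List Int)) (m n c : Nat) : List Int :=
  (List.range m).map (fun r => pureP grid m n r c)

lemma getD_map_range (f : Nat → Int) (m r : Nat) (hr : r < m) :
    ((List.range m).map f).getD r 0 = f r := by
  simp [List.getD_eq_getElem?_getD, hr]

lemma bestMove_eq (grid : List (List Int)) (m n col row : Nat)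
    (hc : col + 1 < n) (hr : row < m) :
    bestMove grid m col (colVec grid m n (col + 1)) row = pureP grid m n row col := by
  have hb : ¬ (col = n - 1) := by omega
  rw [pureP, if_neg hb]
  have e1 : ((row : Int) + (-1)).toNat = row - 1 := by omega
  have e2 : ((row : Int) + 0).toNat = row := by omega
  have e3 : ((row : Int) + 1).toNat = row + 1 := by omega
  simp only [bestMove, List.foldl, e1, e2, e3, colVec]
  -- step 1
  have s1 : (if 0 ≤ (row : Int) + (-1) ∧ (row : Int) + (-1) < (m : Int) ∧
        pvGval grid row col < pvGval grid (row - 1) (col + 1) then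
        max 0 (1 + ((List.range m).map (fun r => pureP grid m n r (col + 1))).getD (row - 1) 0)
      else (0 : Int))
      = (if h1 : 0 < row ∧ row - 1 < m ∧ col + 1 < n ∧ pvGval grid row col < pvGval grid (row - 1) (col + 1) then
        max 0 (1 + pureP grid m n (row - 1) (col + 1)) else 0) := by
    by_cases hg : pvGval grid row col < pvGval grid (row - 1) (col + 1)
    · by_cases hrow : 0 < row ∧ row - 1 < m
      · rw [if_pos ⟨by omega, by omega, hg⟩, dif_pos ⟨hrow.1, hrow.2, hc, hg⟩,
            getD_map_range _ _ _ hrow.2]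
      · rw [if_neg (by omega), dif_neg (by tauto)]
    · rw [if_neg (by tauto), dif_neg (by tauto)]
  rw [s1]
  set v1 := (if h1 : 0 < row ∧ row - 1 < m ∧ col + 1 < n ∧ pvGval grid row col < pvGval grid (row - 1) (col + 1) then
        max 0 (1 + pureP grid m n (row - 1) (col + 1)) else (0 : Int)) with hv1
  have s2 : (if 0 ≤ (row : Int) + 0 ∧ (row : Int) + 0 < (m : Int) ∧
        pvGval grid row col < pvGval grid row (col + 1) then
        max v1 (1 + ((List.range m).map (fun r => pureP grid m n r (col + 1))).getD row 0)
      else v1)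
      = (if h2 : row < m ∧ col + 1 < n ∧ pvGval grid row col < pvGval grid row (col + 1) then
        max v1 (1 + pureP grid m n row (col + 1)) else v1) := by
    by_cases hg : pvGval grid row col < pvGval grid row (col + 1)
    · rw [if_pos ⟨by omega, by omega, hg⟩, dif_pos ⟨hr, hc, hg⟩, getD_map_range _ _ _ hr]
    · rw [if_neg (by tauto), dif_neg (by tauto)]
  rw [s2]
  set v2 := (if h2 : row < m ∧ col + 1 < n ∧ pvGval grid row col < pvGval grid row (col + 1) then
        max v1 (1 + pureP grid m n row (col + 1)) else v1) with hv2
  by_cases hg : pvGval grid row col < pvGval grid (row + 1) (col + 1)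
  · by_cases hrow : row + 1 < m
    · rw [if_pos ⟨by omega, by omega, hg⟩, dif_pos ⟨hrow, hc, hg⟩, getD_map_range _ _ _ hrow]
    · rw [if_neg (by omega), dif_neg (by tauto)]
  · rw [if_neg (by tauto), dif_neg (by tauto)]

lemma replicate_eq_colVec (grid : List (List Int)) (m n : Nat) :
    List.replicate m (0 : Int) = colVec grid m n (n - 1) := by
  rw [colVec]
  rw [show (List.replicate m (0 : Int)) = (List.range m).map (fun _ => (0 : Int)) by
       simp [List.map_const']]
  apply List.map_congr_left
  intro r _
  rw [pureP, if_pos rfl]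

lemma colfold (grid : List (List Int)) (m n : Nat) :
    ∀ j, j ≤ n - 1 →
      ((List.range j).reverse).foldl
        (fun nxt col => (List.range m).map (fun row => bestMove grid m col nxt row))
        (colVec grid m n j) = colVec grid m n 0 := by
  intro j
  induction j with
  | zero => intro _; simp [List.range_zero]
  | succ j ih =>
    intro hj
    have hstep : (List.range m).map (fun row => bestMove grid m j (colVec grid m n (j + 1)) row)
        = colVec grid m n j := by
      apply List.map_congr_left
      intro r hr
      exact bestMove_eq grid m n j r (by omega) (List.mem_range.mp hr)
    rw [List.range_succ, List.reverse_append, List.reverse_singleton]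
    simp only [List.singleton_append, List.foldl_cons]
    rw [hstep]
    exact ih (by omega)

lemma goodDp_init (grid : List (List Int)) (m n mm nn : Nat) :
    goodDp grid m n (List.replicate mm (List.replicate nn (-1 : Int))) := by
  intro r c hne
  exfalso
  apply hne
  by_cases hr : r < mm
  · simp [List.getD_eq_getElem?_getD, hr]
  · simp [List.getD_eq_getElem?_getD, hr]

lemma afold (grid : List (List Int)) (m n : Nat) :
    ∀ (l : List Nat) (st : List (List Int) × Int), goodDp grid m n st.1 →
      (l.foldl (fun (st : List (List Int) × Int) i =>
          let r := dfsA grid m n n i 0 st.1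
          (r.1, max st.2 r.2)) st).2
        = l.foldl (fun a i => max a (pureP grid m n i 0)) st.2 := by
  intro l
  induction l with
  | nil => intro st _; rfl
  | cons i t ih =>
    intro st hst
    obtain ⟨e, g⟩ := dfs_correct grid m n n 0 i st.1 (by omega) hst
    simp only [List.foldl_cons]
    rw [ih ((dfsA grid m n n i 0 st.1).1, max st.2 (dfsA grid m n n i 0 st.1).2) g, e]

lemma nonneg_foldl_max_eq (l : List Int) (h : ∀ y ∈ l, 0 ≤ y) :
    l.foldl max 0 = (match PySem.List.max? l (fun x => x) with
      | some v => v | none => 0) := by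
  cases l with
  | nil => simp [PySem.List.max?]
  | cons x t =>
    rw [PySem.List.max?_id_cons]
    simp only [List.foldl_cons]
    have hx : max 0 x = x := max_eq_right (h x (by simp))
    rw [hx]

theorem pv_main (grid : List (List Int)) : maxMoves grid = maxMoves_alt grid := by
  simp only [maxMoves, maxMoves_alt]
  set m := grid.length
  set n := (grid.headD []).length
  rw [afold grid m n _ _ (goodDp_init grid m n m n)]
  rw [replicate_eq_colVec grid m n, colfold grid m n (n - 1) (le_refl _)]
  have : (List.range m).foldl (fun a i => max a (pureP grid m n i 0)) 0
      = (colVec grid m n 0).foldl max 0 := by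
    rw [colVec, List.foldl_map]
  rw [this]
  apply nonneg_foldl_max_eq
  intro y hy
  rw [colVec] at hy
  obtain ⟨r, _, hr⟩ := List.mem_map.mp hy
  rw [← hr]
  exact pureP_nonneg grid m n r 0

-- ===== VERDICT (by name: the statement is the Claim_ definition above) =====
theorem maxMoves_spec : Claim_equal_maxMoves := by
  intro grid _ _
  unfold Spec_maxMoves
  exact pv_main grid
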